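-- pv_equiv track=rewrite | github.com/bminchew/GMSLR_forecast_v1 | slr_forecast/notebooks/slr_data_readers.py | _check_units_are_standard
-- ===== SOURCE A (Python) =====
-- _UNIT_REGISTRY = {
--     # Length  (base = meters)
--     'm':   {'dimension': 'length', 'to_base': 1.0},
--     'mm':  {'dimension': 'length', 'to_base': 0.001},
--     'cm':  {'dimension': 'length', 'to_base': 0.01},
--     'ft':  {'dimension': 'length', 'to_base': 0.3048},
--     'in':  {'dimension': 'length', 'to_base': 0.0254},
--     # Temperature  (affine — factors handled in _convert_temperature)
--     'degC': {'dimension': 'temperature'},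
--     'degF': {'dimension': 'temperature'},
--     'K':    {'dimension': 'temperature'},
--     # Time  (base = years)
--     'yr':    {'dimension': 'time', 'to_base': 1.0},
--     'day':   {'dimension': 'time', 'to_base': 1.0 / 365.25},
--     'month': {'dimension': 'time', 'to_base': 1.0 / 12.0},
--     's':     {'dimension': 'time', 'to_base': 1.0 / 31557600.0},
-- }
--
-- _STANDARD_UNITS = {'length': 'm', 'temperature': 'degC', 'time': 'yr'}
--
-- def _get_dimension(unit_str: str) -> str:
--     """Return the physical dimension of a *simple* (non-compound) unit string.
--
--     Parameters
--     ----------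
--     unit_str : str
--         A unit string such as ``'m'``, ``'degC'``, ``'yr'``.
--
--     Returns
--     -------
--     str
--         One of ``'length'``, ``'temperature'``, ``'time'``.
--
--     Raises
--     ------
--     ValueError
--         If *unit_str* is not in the registry.
--     """
--     entry = _UNIT_REGISTRY.get(unit_str)
--     if entry is None:
--         raise ValueError(
--             f"Unknown unit '{unit_str}'. "
--             f"Supported units: {sorted(_UNIT_REGISTRY.keys())}"
--         )
--     return entry['dimension']
--
-- def _standard_unit_for(unit_str: str) -> str:
--     """Return the standard unit string for the dimension of *unit_str*.
--
--     Handles compound (rate) units like ``'mm/yr'`` → ``'m/yr'``.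
--     """
--     if '/' in unit_str:
--         parts = unit_str.split('/')
--         return '/'.join(_standard_unit_for(p) for p in parts)
--     dim = _get_dimension(unit_str)
--     return _STANDARD_UNITS[dim]
--
-- def _check_units_are_standard(current_units: dict) -> bool:
--     """Return True if every unit in *current_units* matches the standard."""
--     for col, unit in current_units.items():
--         try:
--             if unit != _standard_unit_for(unit):
--                 return False
--         except ValueError:
--             # Unknown unit — not standard
--             return False
--     return True
-- ===== SOURCE B (Python) =====
-- _STANDARD = {'m', 'degC', 'yr'}
--
--
-- def _check_units_are_standard(current_units: dict) -> bool:
--     """Return True if every unit in *current_units* matches the standard."""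
--     return all(part in _STANDARD
--                for unit in current_units.values()
--                for part in unit.split('/'))
-- ===== Notes on version B (the rewrite author's own statement) =====
-- stated objective: simpler
-- what changed: B drops the registry/dimension machinery and the recursive _standard_unit_for helper entirely: a unit is standard iff every '/'-separated part is in the precomputed set {'m','degC','yr'}, tested with one flat all(...) over split parts.
import Mathlib
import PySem

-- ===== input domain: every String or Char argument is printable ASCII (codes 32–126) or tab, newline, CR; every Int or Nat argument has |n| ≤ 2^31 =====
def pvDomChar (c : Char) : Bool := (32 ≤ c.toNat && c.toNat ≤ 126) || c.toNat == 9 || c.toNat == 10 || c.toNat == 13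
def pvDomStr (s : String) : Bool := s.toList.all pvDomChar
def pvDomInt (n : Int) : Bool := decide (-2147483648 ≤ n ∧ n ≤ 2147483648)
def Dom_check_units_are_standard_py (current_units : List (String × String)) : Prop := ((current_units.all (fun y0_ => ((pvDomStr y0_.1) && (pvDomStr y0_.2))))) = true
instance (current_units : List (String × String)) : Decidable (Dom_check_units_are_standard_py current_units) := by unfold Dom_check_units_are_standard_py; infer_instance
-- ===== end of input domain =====

-- B replaces the registry/dimension machinery and the recursive helper by one flat
-- membership test of every '/'-separated part in the set {'m','degC','yr'} (objective: simpler).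

-- ===== PORT A =====
-- Strings are modelled as List Char throughout (PySem convention).
-- _UNIT_REGISTRY: its 'to_base' float entries are never read on the call chain of
-- _check_units_are_standard (only entry['dimension'] is), so the registry is ported
-- as the unit -> dimension map that _get_dimension reads.
def pvUnitRegistry : PySem.Dict (List Char) (List Char) :=
  PySem.Dict.mk
    [("m".toList, "length".toList), ("mm".toList, "length".toList),
     ("cm".toList, "length".toList), ("ft".toList, "length".toList),
     ("in".toList, "length".toList),
     ("degC".toList, "temperature".toList), ("degF".toList, "temperature".toList),
     ("K".toList, "temperature".toList),
     ("yr".toList, "time".toList), ("day".toList, "time".toList),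
     ("month".toList, "time".toList), ("s".toList, "time".toList)]

-- _STANDARD_UNITS
def pvStandardUnits : PySem.Dict (List Char) (List Char) :=
  PySem.Dict.mk
    [("length".toList, "m".toList), ("temperature".toList, "degC".toList),
     ("time".toList, "yr".toList)]

-- _get_dimension: none = ValueError ("Unknown unit")
def pvGetDimension? (u : List Char) : Option (List Char) :=
  PySem.Dict.get? pvUnitRegistry u

-- the non-'/' branch of _standard_unit_for: _STANDARD_UNITS[_get_dimension(unit_str)];
-- the _STANDARD_UNITS lookup can never fail (every dimension the registry stores is a key)
def pvSimpleStd? (u : List Char) : Option (List Char) :=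
  (pvGetDimension? u).bind (fun dim => PySem.Dict.get? pvStandardUnits dim)

-- _standard_unit_for: '/' in unit_str (a 1-char substring test = char membership);
-- the recursive call on each part of unit_str.split('/') always takes the non-'/'
-- branch, because split parts contain no '/', so it is ported as pvSimpleStd? per part;
-- none = ValueError propagating out.
def pvStandardUnitFor? (u : List Char) : Option (List Char) :=
  if '/' ∈ u then
    ((PySem.Chars.splitOn u ['/']).mapM pvSimpleStd?).map (PySem.Chars.join ['/'])
  else pvSimpleStd? u

-- the for-loop of _check_units_are_standard with its early returns
-- (except ValueError: return False  =  the none case)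
def pvCheckLoop : List (String × String) → Bool
  | [] => true
  | (_, u) :: rest =>
    match pvStandardUnitFor? u.toList with
    | none => false
    | some s => if u.toList ≠ s then false else pvCheckLoop rest

def check_units_are_standard_py (current_units : List (String × String)) : Bool :=
  pvCheckLoop current_units

-- ===== PORT B =====
-- _STANDARD = {'m', 'degC', 'yr'}
def pvStandardSet : PySem.Set (List Char) :=
  PySem.Set.ofList ["m".toList, "degC".toList, "yr".toList]

-- all(part in _STANDARD for unit in current_units.values() for part in unit.split('/'))
def check_units_are_standard_py_alt (current_units : List (String × String)) : Bool :=
  current_units.all (fun kv =>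
    (PySem.Chars.splitOn kv.2.toList ['/']).all (fun part => pvStandardSet.contains part))

-- ===== PRECONDITION & SPEC =====
def Spec_check_units_are_standard_py (current_units : List (String × String)) (out : Bool) : Prop := out = check_units_are_standard_py_alt current_units
instance (current_units : List (String × String)) (out : Bool) : Decidable (Spec_check_units_are_standard_py current_units out) := by unfold Spec_check_units_are_standard_py; infer_instance

-- ===== CLAIM (what is proved, stated in full; the proofs are below) =====
def Claim_equal_check_units_are_standard_py : Prop := ∀ (current_units : List (String × String)), Dom_check_units_are_standard_py current_units → Spec_check_units_are_standard_py current_units (check_units_are_standard_py current_units)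

-- ===== LEMMAS AND PROOFS =====

-- reference splitter: pvPieces pre l = the '/'-split pieces of pre ++ l ('/'-free pre prefixes the first piece)
def pvPieces (pre l : List Char) : List (List Char) :=
  match l with
  | [] => [pre]
  | c :: rest => if c = '/' then pre :: pvPieces [] rest else pvPieces (pre ++ [c]) rest

theorem pvGo_eq_pieces (l : List Char) : ∀ (fuel : Nat) (cur : List Char) (acc : List (List Char)),
    l.length < fuel →
    PySem.Chars.splitOn.go ['/'] fuel l cur acc = acc.reverse ++ pvPieces cur.reverse l := by
  induction l with
  | nil =>
    intro fuel cur acc h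
    match fuel with
    | f + 1 => simp [PySem.Chars.splitOn.go, pvPieces]
  | cons c rest ih =>
    intro fuel cur acc h
    match fuel with
    | f + 1 =>
      by_cases hc : c = '/'
      · subst hc
        simp only [PySem.Chars.splitOn.go, List.isPrefixOf, BEq.rfl, Bool.true_and, if_true]
        rw [show List.drop (['/'] : List Char).length ('/' :: rest) = rest from rfl]
        rw [ih f [] (cur.reverse :: acc) (by simpa using h)]
        simp [pvPieces]
      · have hbe : (('/' : Char) == c) = false := by
          simp [beq_eq_false_iff_ne]
          exact fun hh => hc hh.symm
        simp only [PySem.Chars.splitOn.go, List.isPrefixOf, hbe, Bool.false_and,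
          Bool.false_eq_true, if_false]
        rw [ih f (c :: cur) acc (by simpa using h)]
        simp [pvPieces, hc]

theorem pvSplitOn_eq_pieces (l : List Char) : PySem.Chars.splitOn l ['/'] = pvPieces [] l := by
  simpa using pvGo_eq_pieces l (l.length + 1) [] [] (by omega)

theorem pvPieces_no_slash (l : List Char) : ∀ pre, '/' ∉ l → pvPieces pre l = [pre ++ l] := by
  induction l with
  | nil => intro pre _; simp [pvPieces]
  | cons c rest ih =>
    intro pre h
    have hc : ¬ (c = '/') := fun hh => h (by simp [hh])
    rw [pvPieces, if_neg hc, ih (pre ++ [c]) (fun hh => h (List.mem_cons_of_mem _ hh))]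
    simp

theorem pvPieces_ne_nil (l : List Char) : ∀ pre, pvPieces pre l ≠ [] := by
  induction l with
  | nil => intro pre; simp [pvPieces]
  | cons c rest ih => intro pre; by_cases hc : c = '/' <;> simp [pvPieces, hc, ih]

theorem pvJoin_pieces (l : List Char) : ∀ pre, PySem.Chars.join ['/'] (pvPieces pre l) = pre ++ l := by
  induction l with
  | nil => intro pre; simp [pvPieces, PySem.Chars.join_singleton]
  | cons c rest ih =>
    intro pre
    by_cases hc : c = '/'
    · subst hc
      simp only [pvPieces, if_true]
      obtain ⟨x, xs, hx⟩ : ∃ x xs, pvPieces ([] : List Char) rest = x :: xs := by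
        cases hp : pvPieces ([] : List Char) rest with
        | nil => exact absurd hp (pvPieces_ne_nil rest [])
        | cons x xs => exact ⟨x, xs, rfl⟩
      rw [hx, PySem.Chars.join_cons_cons]
      have hjoin := ih ([] : List Char)
      rw [hx] at hjoin
      simp [hjoin]
    · rw [pvPieces, if_neg hc, ih (pre ++ [c])]
      simp

theorem pvPieces_append (q : List Char) : ∀ pre l, '/' ∉ q → pvPieces pre (q ++ l) = pvPieces (pre ++ q) l := by
  induction q with
  | nil => intro pre l _; simp
  | cons c rest ih =>
    intro pre l h
    have hc : ¬ (c = '/') := fun hh => h (by simp [hh])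
    rw [List.cons_append, pvPieces, if_neg hc, ih (pre ++ [c]) l (fun hh => h (List.mem_cons_of_mem _ hh))]
    simp

theorem pvPieces_join (qs : List (List Char)) (hne : qs ≠ []) (hfree : ∀ q ∈ qs, '/' ∉ q) :
    pvPieces [] (PySem.Chars.join ['/'] qs) = qs := by
  induction qs with
  | nil => exact absurd rfl hne
  | cons q rest ih =>
    cases rest with
    | nil => rw [PySem.Chars.join_singleton]; simpa using pvPieces_no_slash q [] (hfree q (by simp))
    | cons q2 rest2 =>
      rw [PySem.Chars.join_cons_cons, List.append_assoc,
        pvPieces_append q [] (['/'] ++ PySem.Chars.join ['/'] (q2 :: rest2)) (hfree q (by simp))]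
      rw [show (([] : List Char) ++ q) = q from by simp]
      rw [show ((['/'] : List Char) ++ PySem.Chars.join ['/'] (q2 :: rest2))
            = '/' :: PySem.Chars.join ['/'] (q2 :: rest2) from rfl]
      rw [pvPieces, if_pos rfl, ih (by simp) (fun x hx => hfree x (by simp [hx]))]

-- shorthand for "is one of the three standard units"
def pvIsStd (p : List Char) : Prop :=
  p = "m".toList ∨ p = "degC".toList ∨ p = "yr".toList

theorem pvSimpleStd_range (p q : List Char) (h : pvSimpleStd? p = some q) : pvIsStd q := by
  unfold pvSimpleStd? pvGetDimension? at h
  match hd : PySem.Dict.get? pvUnitRegistry p with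
  | none => rw [hd] at h; simp at h
  | some dim =>
    rw [hd] at h
    simp only [Option.bind_some] at h
    have hmem := (PySem.Dict.get?_eq_some_iff_mem_items pvUnitRegistry p dim (by decide)).mp hd
    simp only [pvUnitRegistry, List.mem_cons, List.not_mem_nil, or_false, Prod.mk.injEq] at hmem
    rcases hmem with ⟨_, hv⟩ | ⟨_, hv⟩ | ⟨_, hv⟩ | ⟨_, hv⟩ | ⟨_, hv⟩ | ⟨_, hv⟩ | ⟨_, hv⟩ |
      ⟨_, hv⟩ | ⟨_, hv⟩ | ⟨_, hv⟩ | ⟨_, hv⟩ | ⟨_, hv⟩ <;> subst hv <;>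
      rw [show PySem.Dict.get? pvStandardUnits _ = some _ from rfl] at h <;>
      simp only [Option.some.injEq] at h <;> subst h <;> unfold pvIsStd <;> decide

theorem pvSimpleStd_of_standard (p : List Char) (h : pvIsStd p) : pvSimpleStd? p = some p := by
  rcases h with h | h | h <;> subst h <;> decide

theorem pvStandard_no_slash (p : List Char) (h : pvIsStd p) : '/' ∉ p := by
  rcases h with h | h | h <;> subst h <;> decide

theorem pvMem_iff (p : List Char) : p ∈ pvStandardSet ↔ pvIsStd p := by
  rw [show pvStandardSet = ["m".toList, "degC".toList, "yr".toList] from by decide]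
  unfold pvIsStd
  simp

theorem pvMapM_of_id {f : List Char → Option (List Char)} (l : List (List Char))
    (h : ∀ p ∈ l, f p = some p) : l.mapM f = some l := by
  induction l with
  | nil => rfl
  | cons x xs ih =>
    rw [List.mapM_cons, h x (by simp), ih (fun p hp => h p (by simp [hp]))]; rfl

theorem pvMapM_id_of_eq {f : List Char → Option (List Char)} (l : List (List Char))
    (h : l.mapM f = some l) : ∀ p ∈ l, f p = some p := by
  induction l with
  | nil => simp
  | cons x xs ih =>
    rw [List.mapM_cons] at h
    match hfx : f x with
    | none => rw [hfx] at h; simp at h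
    | some y =>
      rw [hfx] at h
      match hxs : xs.mapM f with
      | none => rw [hxs] at h; simp at h
      | some ys =>
        rw [hxs] at h
        simp at h
        obtain ⟨hy, hys⟩ := h
        intro p hp
        rcases List.mem_cons.mp hp with rfl | hp'
        · rw [hfx, hy]
        · exact ih (by rw [hxs, hys]) p hp'

theorem pvMapM_range {f : List Char → Option (List Char)} (l qs : List (List Char))
    (h : l.mapM f = some qs) : ∀ q ∈ qs, ∃ p ∈ l, f p = some q := by
  induction l generalizing qs with
  | nil => simp at h; subst h; simp
  | cons x xs ih =>
    rw [List.mapM_cons] at h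
    match hfx : f x with
    | none => rw [hfx] at h; simp at h
    | some y =>
      rw [hfx] at h
      match hxs : xs.mapM f with
      | none => rw [hxs] at h; simp at h
      | some ys =>
        rw [hxs] at h
        simp at h
        subst h
        intro q hq
        rcases List.mem_cons.mp hq with rfl | hq'
        · exact ⟨x, by simp, hfx⟩
        · obtain ⟨p, hp, hfp⟩ := ih ys hxs q hq'
          exact ⟨p, by simp [hp], hfp⟩

theorem pvMapM_ne_nil {f : List Char → Option (List Char)} (l qs : List (List Char))
    (hl : l ≠ []) (h : l.mapM f = some qs) : qs ≠ [] := by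
  cases l with
  | nil => exact absurd rfl hl
  | cons x xs =>
    rw [List.mapM_cons] at h
    intro hq
    subst hq
    cases hfx : f x <;> rw [hfx] at h <;> cases hxs : xs.mapM f <;> simp [hxs] at h

-- the per-unit equivalence
theorem pvUnit_key (u : List Char) :
    (match pvStandardUnitFor? u with
     | none => false
     | some s => if u ≠ s then false else true)
    = (PySem.Chars.splitOn u ['/']).all (fun part => pvStandardSet.contains part) := by
  rw [pvSplitOn_eq_pieces]
  by_cases hsl : '/' ∈ u
  · -- compound unit: A maps pvSimpleStd? over the same pieces and rejoins
    unfold pvStandardUnitFor?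
    rw [if_pos hsl, pvSplitOn_eq_pieces]
    by_cases hall : ∀ p ∈ pvPieces [] u, pvIsStd p
    · rw [pvMapM_of_id (pvPieces [] u) (fun p hp => pvSimpleStd_of_standard p (hall p hp))]
      simp only [Option.map_some]
      rw [show PySem.Chars.join ['/'] (pvPieces [] u) = u from by simpa using pvJoin_pieces u []]
      simp only [ne_eq, not_true_eq_false, if_false]
      symm
      rw [List.all_eq_true]
      intro p hp
      simpa [pvMem_iff] using hall p hp
    · have hrhs : (pvPieces [] u).all (fun part => pvStandardSet.contains part) = false := by
        rw [List.all_eq_false]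
        simp only [not_forall] at hall
        obtain ⟨p0, hp0, hns⟩ := hall
        exact ⟨p0, hp0, by simpa [pvMem_iff] using hns⟩
      rw [hrhs]
      match hm : (pvPieces [] u).mapM pvSimpleStd? with
      | none => rfl
      | some qs =>
        simp only [Option.map_some]
        have hqs : ∀ q ∈ qs, pvIsStd q := by
          intro q hq
          obtain ⟨p, _, hfp⟩ := pvMapM_range _ qs hm q hq
          exact pvSimpleStd_range p q hfp
        have hne : u ≠ PySem.Chars.join ['/'] qs := by
          intro he
          have hqnn : qs ≠ [] := pvMapM_ne_nil _ qs (pvPieces_ne_nil u []) hm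
          have hpq : pvPieces [] u = qs := by
            rw [he, pvPieces_join qs hqnn (fun q hq => pvStandard_no_slash q (hqs q hq))]
          apply hall
          intro p hp
          have hfp := pvMapM_id_of_eq (pvPieces [] u) (by rw [hm, hpq]) p hp
          exact pvSimpleStd_range p p hfp
        rw [if_pos hne]
  · -- simple unit: one piece, which is u itself
    have hpieces : pvPieces [] u = [u] := by simpa using pvPieces_no_slash u [] hsl
    unfold pvStandardUnitFor?
    rw [if_neg hsl, hpieces]
    by_cases hu : pvIsStd u
    · rw [pvSimpleStd_of_standard u hu]
      simp [pvMem_iff, hu]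
    · match hs : pvSimpleStd? u with
      | none => simp [pvMem_iff, hu]
      | some q =>
        have hq := pvSimpleStd_range u q hs
        have : u ≠ q := fun he => hu (he ▸ hq)
        simp [this, pvMem_iff, hu]

theorem pvLoop_eq_alt (cu : List (String × String)) :
    pvCheckLoop cu = check_units_are_standard_py_alt cu := by
  induction cu with
  | nil => rfl
  | cons kv rest ih =>
    obtain ⟨k, u⟩ := kv
    have halt : check_units_are_standard_py_alt ((k, u) :: rest)
        = (((PySem.Chars.splitOn u.toList ['/']).all fun part => pvStandardSet.contains part)
            && check_units_are_standard_py_alt rest) := by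
      simp [check_units_are_standard_py_alt]
    rw [halt, ← pvUnit_key u.toList, pvCheckLoop]
    cases hs : pvStandardUnitFor? u.toList with
    | none => simp
    | some s =>
      by_cases he : u.toList = s
      · simp [he, ih]
      · simp [he]

-- ===== VERDICT (by name: the statement is the Claim_ definition above) =====
theorem check_units_are_standard_py_spec : Claim_equal_check_units_are_standard_py := by
  intro cu _
  unfold Spec_check_units_are_standard_py check_units_are_standard_py
  exact pvLoop_eq_alt cu
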